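-- pv_equiv track=rewrite | github.com/Christiancoding/Linux-Practice | linux_plus_study_v3/views/web_view.py | _simulate_command
-- ===== SOURCE A (Python) =====
-- from typing import Any, Dict, List, Optional, Union, Tuple, Set, cast, TypedDict, Protocol, runtime_checkable, Callable
-- from typing import Any, Dict, Optional
--
-- def _simulate_command(command: str) -> Optional[str]:
--     """Simulate common commands with educational examples"""
--
--     # Create sample files content
--     sample_files = {
--         'sample.txt': 'Hello Linux Plus student!\nThis is a sample text file.\nPractice your command line skills here.\nGood luck with your certification!',
--         'log.txt': 'INFO: System started\nERROR: Failed to connect\nINFO: Retrying connection\nWARNING: Low disk space\nINFO: Connection established',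
--         'log.txt': 'INFO: System started\nERROR: Failed to connect\nINFO: Retrying connection\nWARNING: Low disk space\nINFO: Connection established',
--         'data.csv': 'name,age,city\nJohn,25,New York\nJane,30,Los Angeles\nBob,35,Chicago',
--         'config.conf': '[database]\nhost=localhost\nport=5432\nname=mydb\n\n[logging]\nlevel=INFO\nfile=/var/log/app.log'
--     }
--
--     cmd_parts = command.split()
--     if not cmd_parts:
--         return None
--
--     base_cmd = cmd_parts[0]
--
--     # Simulate ls command
--     if base_cmd == 'ls':
--         if len(cmd_parts) == 1:
--             return 'sample.txt  log.txt  data.csv  config.conf  docs/  scripts/'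
--         else:
--             return 'sample.txt  log.txt  data.csv  config.conf'
--
--     # Simulate cat command
--     elif base_cmd == 'cat' and len(cmd_parts) > 1:
--         filename = cmd_parts[1]
--         if filename in sample_files:
--             return sample_files[filename]
--         else:
--             return f'cat: {filename}: No such file or directory'
--
--     # Simulate grep command
--     elif base_cmd == 'grep' and len(cmd_parts) >= 3:
--         pattern = cmd_parts[1].strip('"\'')
--         filename = cmd_parts[2]
--         if filename in sample_files:
--             lines = sample_files[filename].split('\n')
--             matches = [line for line in lines if pattern.lower() in line.lower()]
--             return '\n'.join(matches) if matches else f'grep: no matches found for "{pattern}"'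
--         else:
--             return f'grep: {filename}: No such file or directory'
--
--     # Simulate wc command
--     elif base_cmd == 'wc' and len(cmd_parts) > 1:
--         filename = cmd_parts[1]
--         if filename in sample_files:
--             content = sample_files[filename]
--             lines = len(content.split('\n'))
--             words = len(content.split())
--             chars = len(content)
--             return f'{lines:8} {words:8} {chars:8} {filename}'
--         else:
--             return f'wc: {filename}: No such file or directory'
--
--     return None  # Command not simulated, try real execution
-- ===== SOURCE B (Python) =====
-- # B precomputes per-file answer tables at import (full wc output strings and
-- # lowercased line indexes for grep) and dispatches with one structural match,
-- # so the per-call work for cat/wc is a single dict lookup.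
--
-- _FILES = {
--     'sample.txt': 'Hello Linux Plus student!\nThis is a sample text file.\nPractice your command line skills here.\nGood luck with your certification!',
--     'log.txt': 'INFO: System started\nERROR: Failed to connect\nINFO: Retrying connection\nWARNING: Low disk space\nINFO: Connection established',
--     'data.csv': 'name,age,city\nJohn,25,New York\nJane,30,Los Angeles\nBob,35,Chicago',
--     'config.conf': '[database]\nhost=localhost\nport=5432\nname=mydb\n\n[logging]\nlevel=INFO\nfile=/var/log/app.log',
-- }
--
-- # Precomputed wc outputs: lines = newline count + 1, words, chars.
-- _WC = {
--     name: f"{content.count(chr(10)) + 1:8} {len(content.split()):8} {len(content):8} {name}"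
--     for name, content in _FILES.items()
-- }
--
-- # Precomputed grep index: each file's lines paired with their lowercase form.
-- _GREP = {
--     name: [(line.lower(), line) for line in content.split('\n')]
--     for name, content in _FILES.items()
-- }
--
--
-- def _simulate_command(command: str) -> "str | None":
--     match command.split():
--         case []:
--             return None
--         case ['ls']:
--             return 'sample.txt  log.txt  data.csv  config.conf  docs/  scripts/'
--         case ['ls', *_]:
--             return 'sample.txt  log.txt  data.csv  config.conf'
--         case ['cat', filename, *_]:
--             return _FILES.get(filename, f'cat: {filename}: No such file or directory')
--         case ['grep', raw, filename, *_]: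
--             pattern = raw.strip('"\'')
--             index = _GREP.get(filename)
--             if index is None:
--                 return f'grep: {filename}: No such file or directory'
--             needle = pattern.lower()
--             hits = [orig for low, orig in index if needle in low]
--             return '\n'.join(hits) if hits else f'grep: no matches found for "{pattern}"'
--         case ['wc', filename, *_]:
--             return _WC.get(filename, f'wc: {filename}: No such file or directory')
--         case _:
--             return None
-- ===== Notes on version B (the rewrite author's own statement) =====
-- stated objective: alternative
-- what changed: Instead of re-deriving everything from raw file contents per call, B builds precomputed answer tables once at import (complete wc output strings per file, and a grep index of lines paired with their lowercase forms) and dispatches via one structural match on the split command, so cat/wc become a single table lookup and grep scans a prelowered index.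
import Mathlib
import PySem

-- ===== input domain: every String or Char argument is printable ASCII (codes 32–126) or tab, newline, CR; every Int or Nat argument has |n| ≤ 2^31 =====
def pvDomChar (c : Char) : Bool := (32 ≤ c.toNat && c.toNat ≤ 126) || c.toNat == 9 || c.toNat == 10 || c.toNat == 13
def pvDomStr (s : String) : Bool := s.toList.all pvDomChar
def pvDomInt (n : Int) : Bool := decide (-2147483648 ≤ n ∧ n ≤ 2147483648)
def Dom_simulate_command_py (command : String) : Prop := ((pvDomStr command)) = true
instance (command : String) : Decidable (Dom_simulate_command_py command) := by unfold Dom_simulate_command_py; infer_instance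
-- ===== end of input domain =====

-- B precomputes per-file answer tables once (wc output strings, lowercased grep line index) and dispatches with one structural match; alternative organization, same cost.


-- ===== PORT A =====
-- s.split("\n") (the separator is non-empty, so PySem.Str.split? is always some)
def pvSplitNl (s : String) : List String := (PySem.Str.split? s "\n").getD []

-- f'{n:8}': right-justify the decimal representation to width 8 (exact for the nonnegative ints used here)
def pvFmt8 (n : Int) : String :=
  let s := (PySem.Int.toStr n).toList
  String.ofList (List.replicate (8 - s.length) ' ' ++ s)

def simulate_command_py (command : String) : Option String :=
  let sample_files : PySem.Dict String String :=
    ((((PySem.Dict.empty.insert "sample.txt" "Hello Linux Plus student!\nThis is a sample text file.\nPractice your command line skills here.\nGood luck with your certification!").insert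
        "log.txt" "INFO: System started\nERROR: Failed to connect\nINFO: Retrying connection\nWARNING: Low disk space\nINFO: Connection established").insert
        "log.txt" "INFO: System started\nERROR: Failed to connect\nINFO: Retrying connection\nWARNING: Low disk space\nINFO: Connection established").insert
        "data.csv" "name,age,city\nJohn,25,New York\nJane,30,Los Angeles\nBob,35,Chicago").insert
        "config.conf" "[database]\nhost=localhost\nport=5432\nname=mydb\n\n[logging]\nlevel=INFO\nfile=/var/log/app.log"
  let cmd_parts := PySem.Str.split₀ command
  if cmd_parts = [] then none
  else
    let base_cmd := cmd_parts.headD ""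
    if base_cmd = "ls" then
      if cmd_parts.length = 1 then some "sample.txt  log.txt  data.csv  config.conf  docs/  scripts/"
      else some "sample.txt  log.txt  data.csv  config.conf"
    else if base_cmd = "cat" ∧ cmd_parts.length > 1 then
      let filename := cmd_parts.getD 1 ""
      if sample_files.contains filename then some (sample_files.getD filename "")
      else some ("cat: " ++ filename ++ ": No such file or directory")
    else if base_cmd = "grep" ∧ cmd_parts.length ≥ 3 then
      let pattern := PySem.Str.stripChars (cmd_parts.getD 1 "") "\"'"
      let filename := cmd_parts.getD 2 ""
      if sample_files.contains filename then
        let lines := pvSplitNl (sample_files.getD filename "")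
        let matched := lines.filter (fun line => PySem.Str.isIn (PySem.Str.lower pattern) (PySem.Str.lower line))
        if matched ≠ [] then some (PySem.Str.join "\n" matched)
        else some ("grep: no matches found for \"" ++ pattern ++ "\"")
      else some ("grep: " ++ filename ++ ": No such file or directory")
    else if base_cmd = "wc" ∧ cmd_parts.length > 1 then
      let filename := cmd_parts.getD 1 ""
      if sample_files.contains filename then
        let content := sample_files.getD filename ""
        let lines := (pvSplitNl content).length
        let words := (PySem.Str.split₀ content).length
        let chars := PySem.Str.len content
        some (pvFmt8 lines ++ " " ++ pvFmt8 words ++ " " ++ pvFmt8 chars ++ " " ++ filename)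
      else some ("wc: " ++ filename ++ ": No such file or directory")
    else none

-- ===== PORT B =====
def pvFilesDict : PySem.Dict String String := PySem.Dict.ofList
  [ ("sample.txt", "Hello Linux Plus student!\nThis is a sample text file.\nPractice your command line skills here.\nGood luck with your certification!"),
    ("log.txt", "INFO: System started\nERROR: Failed to connect\nINFO: Retrying connection\nWARNING: Low disk space\nINFO: Connection established"),
    ("data.csv", "name,age,city\nJohn,25,New York\nJane,30,Los Angeles\nBob,35,Chicago"),
    ("config.conf", "[database]\nhost=localhost\nport=5432\nname=mydb\n\n[logging]\nlevel=INFO\nfile=/var/log/app.log") ]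

-- _WC: precomputed full wc output per file (lines = newline count + 1)
def pvWcTable : PySem.Dict String String := PySem.Dict.ofList
  (pvFilesDict.items.map (fun nc =>
    (nc.1, pvFmt8 ((PySem.Str.count nc.2 "\n" : Int) + 1) ++ " " ++
           pvFmt8 ((PySem.Str.split₀ nc.2).length : Int) ++ " " ++
           pvFmt8 (PySem.Str.len nc.2 : Int) ++ " " ++ nc.1)))

-- _GREP: precomputed index of (lowercased line, line) per file
def pvGrepTable : PySem.Dict String (List (String × String)) := PySem.Dict.ofList
  (pvFilesDict.items.map (fun nc =>
    (nc.1, (pvSplitNl nc.2).map (fun line => (PySem.Str.lower line, line)))))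

def simulate_command_py_alt (command : String) : Option String :=
  match PySem.Str.split₀ command with
  | [] => none
  | ["ls"] => some "sample.txt  log.txt  data.csv  config.conf  docs/  scripts/"
  | "ls" :: _ => some "sample.txt  log.txt  data.csv  config.conf"
  | "cat" :: filename :: _ =>
      some (pvFilesDict.getD filename ("cat: " ++ filename ++ ": No such file or directory"))
  | "grep" :: raw :: filename :: _ =>
      let pattern := PySem.Str.stripChars raw "\"'"
      match pvGrepTable.get? filename with
      | none => some ("grep: " ++ filename ++ ": No such file or directory")
      | some index =>
        let needle := PySem.Str.lower pattern
        let hits := (index.filter (fun p => PySem.Str.isIn needle p.1)).map Prod.snd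
        if hits ≠ [] then some (PySem.Str.join "\n" hits)
        else some ("grep: no matches found for \"" ++ pattern ++ "\"")
  | "wc" :: filename :: _ =>
      some (pvWcTable.getD filename ("wc: " ++ filename ++ ": No such file or directory"))
  | _ => none

-- ===== PRECONDITION & SPEC =====
def Spec_simulate_command_py (command : String) (out : Option String) : Prop := out = simulate_command_py_alt command
instance (command : String) (out : Option String) : Decidable (Spec_simulate_command_py command out) := by unfold Spec_simulate_command_py; infer_instance

-- ===== CLAIM (what is proved, stated in full; the proofs are below) =====
def Claim_equal_simulate_command_py : Prop := ∀ (command : String), Dom_simulate_command_py command → Spec_simulate_command_py command (simulate_command_py command)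

-- ===== LEMMAS AND PROOFS =====

-- A builds its dict by successive inserts (with a duplicated 'log.txt' entry); it equals B's pvFilesDict.
set_option maxRecDepth 100000 in
theorem pvDictA_eq :
    ((((PySem.Dict.empty.insert "sample.txt" "Hello Linux Plus student!\nThis is a sample text file.\nPractice your command line skills here.\nGood luck with your certification!").insert
        "log.txt" "INFO: System started\nERROR: Failed to connect\nINFO: Retrying connection\nWARNING: Low disk space\nINFO: Connection established").insert
        "log.txt" "INFO: System started\nERROR: Failed to connect\nINFO: Retrying connection\nWARNING: Low disk space\nINFO: Connection established").insert
        "data.csv" "name,age,city\nJohn,25,New York\nJane,30,Los Angeles\nBob,35,Chicago").insert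
        "config.conf" "[database]\nhost=localhost\nport=5432\nname=mydb\n\n[logging]\nlevel=INFO\nfile=/var/log/app.log"
      = pvFilesDict := by rfl

set_option maxRecDepth 100000 in
theorem pvFilesDict_mk : pvFilesDict = PySem.Dict.mk
      [ ("sample.txt", "Hello Linux Plus student!\nThis is a sample text file.\nPractice your command line skills here.\nGood luck with your certification!"),
        ("log.txt", "INFO: System started\nERROR: Failed to connect\nINFO: Retrying connection\nWARNING: Low disk space\nINFO: Connection established"),
        ("data.csv", "name,age,city\nJohn,25,New York\nJane,30,Los Angeles\nBob,35,Chicago"),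
        ("config.conf", "[database]\nhost=localhost\nport=5432\nname=mydb\n\n[logging]\nlevel=INFO\nfile=/var/log/app.log") ] := by rfl

set_option maxRecDepth 100000 in
theorem pvGrepTable_mk : pvGrepTable = PySem.Dict.mk
      [ ("sample.txt", (pvSplitNl "Hello Linux Plus student!\nThis is a sample text file.\nPractice your command line skills here.\nGood luck with your certification!").map (fun line => (PySem.Str.lower line, line))),
        ("log.txt", (pvSplitNl "INFO: System started\nERROR: Failed to connect\nINFO: Retrying connection\nWARNING: Low disk space\nINFO: Connection established").map (fun line => (PySem.Str.lower line, line))),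
        ("data.csv", (pvSplitNl "name,age,city\nJohn,25,New York\nJane,30,Los Angeles\nBob,35,Chicago").map (fun line => (PySem.Str.lower line, line))),
        ("config.conf", (pvSplitNl "[database]\nhost=localhost\nport=5432\nname=mydb\n\n[logging]\nlevel=INFO\nfile=/var/log/app.log").map (fun line => (PySem.Str.lower line, line))) ] := by rfl

set_option maxRecDepth 100000 in
theorem pvWcTable_mk : pvWcTable = PySem.Dict.mk
      [ ("sample.txt", pvFmt8 ((PySem.Str.count "Hello Linux Plus student!\nThis is a sample text file.\nPractice your command line skills here.\nGood luck with your certification!" "\n" : Int) + 1) ++ " " ++ pvFmt8 ((PySem.Str.split₀ "Hello Linux Plus student!\nThis is a sample text file.\nPractice your command line skills here.\nGood luck with your certification!").length : Int) ++ " " ++ pvFmt8 (PySem.Str.len "Hello Linux Plus student!\nThis is a sample text file.\nPractice your command line skills here.\nGood luck with your certification!" : Int) ++ " " ++ "sample.txt"),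
        ("log.txt", pvFmt8 ((PySem.Str.count "INFO: System started\nERROR: Failed to connect\nINFO: Retrying connection\nWARNING: Low disk space\nINFO: Connection established" "\n" : Int) + 1) ++ " " ++ pvFmt8 ((PySem.Str.split₀ "INFO: System started\nERROR: Failed to connect\nINFO: Retrying connection\nWARNING: Low disk space\nINFO: Connection established").length : Int) ++ " " ++ pvFmt8 (PySem.Str.len "INFO: System started\nERROR: Failed to connect\nINFO: Retrying connection\nWARNING: Low disk space\nINFO: Connection established" : Int) ++ " " ++ "log.txt"),
        ("data.csv", pvFmt8 ((PySem.Str.count "name,age,city\nJohn,25,New York\nJane,30,Los Angeles\nBob,35,Chicago" "\n" : Int) + 1) ++ " " ++ pvFmt8 ((PySem.Str.split₀ "name,age,city\nJohn,25,New York\nJane,30,Los Angeles\nBob,35,Chicago").length : Int) ++ " " ++ pvFmt8 (PySem.Str.len "name,age,city\nJohn,25,New York\nJane,30,Los Angeles\nBob,35,Chicago" : Int) ++ " " ++ "data.csv"),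
        ("config.conf", pvFmt8 ((PySem.Str.count "[database]\nhost=localhost\nport=5432\nname=mydb\n\n[logging]\nlevel=INFO\nfile=/var/log/app.log" "\n" : Int) + 1) ++ " " ++ pvFmt8 ((PySem.Str.split₀ "[database]\nhost=localhost\nport=5432\nname=mydb\n\n[logging]\nlevel=INFO\nfile=/var/log/app.log").length : Int) ++ " " ++ pvFmt8 (PySem.Str.len "[database]\nhost=localhost\nport=5432\nname=mydb\n\n[logging]\nlevel=INFO\nfile=/var/log/app.log" : Int) ++ " " ++ "config.conf") ] := by rfl

set_option maxRecDepth 40000 in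
-- a successful lookup in pvFilesDict pins the key and the content to one of the four entries
theorem pvFiles_cases (q c : String) (hg : pvFilesDict.get? q = some c) :
    (q = "sample.txt" ∧ c = "Hello Linux Plus student!\nThis is a sample text file.\nPractice your command line skills here.\nGood luck with your certification!") ∨
    (q = "log.txt" ∧ c = "INFO: System started\nERROR: Failed to connect\nINFO: Retrying connection\nWARNING: Low disk space\nINFO: Connection established") ∨
    (q = "data.csv" ∧ c = "name,age,city\nJohn,25,New York\nJane,30,Los Angeles\nBob,35,Chicago") ∨
    (q = "config.conf" ∧ c = "[database]\nhost=localhost\nport=5432\nname=mydb\n\n[logging]\nlevel=INFO\nfile=/var/log/app.log") := by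
  rw [pvFilesDict_mk] at hg
  simp only [PySem.Dict.get?_mk_cons] at hg
  split_ifs at hg <;> simp_all [show ∀ x : String, (PySem.Dict.mk ([] : List (String × String))).get? x = none from fun _ => rfl]

-- the precomputed tables have exactly the keys of pvFilesDict
set_option maxRecDepth 40000 in
theorem pvGrep_get_none (q : String) (h : pvFilesDict.get? q = none) : pvGrepTable.get? q = none := by
  rw [pvFilesDict_mk] at h
  simp only [PySem.Dict.get?_mk_cons] at h
  split_ifs at h with h1 h2 h3 h4
  rw [pvGrepTable_mk]
  simp [PySem.Dict.get?_mk_cons, h1, h2, h3, h4,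
    show ∀ x : String, (PySem.Dict.mk ([] : List (String × List (String × String)))).get? x = none from fun _ => rfl]

set_option maxRecDepth 40000 in
theorem pvWc_get_none (q : String) (h : pvFilesDict.get? q = none) : pvWcTable.get? q = none := by
  rw [pvFilesDict_mk] at h
  simp only [PySem.Dict.get?_mk_cons] at h
  split_ifs at h with h1 h2 h3 h4
  rw [pvWcTable_mk]
  simp [PySem.Dict.get?_mk_cons, h1, h2, h3, h4,
    show ∀ x : String, (PySem.Dict.mk ([] : List (String × String))).get? x = none from fun _ => rfl]

-- successful lookups in the precomputed tables, expressed through the file content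
set_option maxRecDepth 40000 in
theorem pvGrep_get_some (q c : String) (hg : pvFilesDict.get? q = some c) :
    pvGrepTable.get? q = some ((pvSplitNl c).map (fun line => (PySem.Str.lower line, line))) := by
  rcases pvFiles_cases q c hg with ⟨h1, h2⟩ | ⟨h1, h2⟩ | ⟨h1, h2⟩ | ⟨h1, h2⟩ <;>
    subst h1 <;> subst h2 <;> rw [pvGrepTable_mk] <;> rfl

set_option maxRecDepth 40000 in
theorem pvWc_get_some (q c : String) (hg : pvFilesDict.get? q = some c) :
    pvWcTable.get? q = some (pvFmt8 ((PySem.Str.count c "\n" : Int) + 1) ++ " " ++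
      pvFmt8 ((PySem.Str.split₀ c).length : Int) ++ " " ++
      pvFmt8 (PySem.Str.len c : Int) ++ " " ++ q) := by
  rcases pvFiles_cases q c hg with ⟨h1, h2⟩ | ⟨h1, h2⟩ | ⟨h1, h2⟩ | ⟨h1, h2⟩ <;>
    subst h1 <;> subst h2 <;> rw [pvWcTable_mk] <;> rfl

set_option maxRecDepth 40000 in
-- on each sample file, splitting at newlines yields newline-count + 1 lines
theorem pvLines_count (q c : String) (hg : pvFilesDict.get? q = some c) :
    ((pvSplitNl c).length : Int) = (PySem.Str.count c "\n" : Int) + 1 := by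
  rcases pvFiles_cases q c hg with ⟨h1, h2⟩ | ⟨h1, h2⟩ | ⟨h1, h2⟩ | ⟨h1, h2⟩ <;> subst h2 <;> decide

-- filtering the prelowered index then projecting equals filtering the raw lines by lowered membership
theorem pvFilterPairs (needle : List Char) (lines : List String) :
    List.map Prod.snd (List.filter (fun p => PySem.Chars.isIn needle p.1.toList)
        (List.map (fun line => (PySem.Str.lower line, line)) lines))
      = List.filter (fun line => PySem.Chars.isIn needle (PySem.Chars.lower line.toList)) lines := by
  induction lines with
  | nil => rfl
  | cons a t ih =>
    simp only [List.map_cons, List.filter_cons]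
    by_cases h : PySem.Chars.isIn needle (PySem.Chars.lower a.toList) = true <;>
      simp [h, ih]

-- ===== VERDICT (by name: the statement is the Claim_ definition above) =====
set_option maxRecDepth 40000 in
theorem simulate_command_py_spec : Claim_equal_simulate_command_py := by
  intro command _
  unfold Spec_simulate_command_py
  simp only [simulate_command_py, simulate_command_py_alt]
  rw [pvDictA_eq]
  rcases hp : PySem.Str.split₀ command with _ | ⟨p, ps⟩
  · simp
  · by_cases hls : p = "ls"
    · subst hls
      rcases ps with _ | ⟨q, qs⟩ <;> simp
    · by_cases hcat : p = "cat"
      · subst hcat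
        rcases ps with _ | ⟨q, qs⟩
        · simp
        · cases hg : pvFilesDict.get? q with
          | none =>
            have hc : pvFilesDict.contains q = false := by
              rw [PySem.Dict.contains_eq_isSome_get?, hg]; rfl
            simp [hc, PySem.Dict.getD_eq_get?_getD, hg]
          | some content =>
            have hc : pvFilesDict.contains q = true := by
              rw [PySem.Dict.contains_eq_isSome_get?, hg]; rfl
            simp [hc, PySem.Dict.getD_eq_get?_getD, hg]
      · by_cases hgrep : p = "grep"
        · subst hgrep
          rcases ps with _ | ⟨q, _ | ⟨r, rs⟩⟩
          · simp
          · simp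
          · cases hg : pvFilesDict.get? r with
            | none =>
              have hc : pvFilesDict.contains r = false := by
                rw [PySem.Dict.contains_eq_isSome_get?, hg]; rfl
              simp [hc, pvGrep_get_none r hg]
            | some content =>
              have hc : pvFilesDict.contains r = true := by
                rw [PySem.Dict.contains_eq_isSome_get?, hg]; rfl
              have hidx := pvGrep_get_some r content hg
              simp [hc, hidx, PySem.Dict.getD_eq_get?_getD, hg, pvFilterPairs]
        · by_cases hwc : p = "wc"
          · subst hwc
            rcases ps with _ | ⟨q, qs⟩
            · simp
            · cases hg : pvFilesDict.get? q with
              | none =>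
                have hc : pvFilesDict.contains q = false := by
                  rw [PySem.Dict.contains_eq_isSome_get?, hg]; rfl
                simp [hc, PySem.Dict.getD_eq_get?_getD, pvWc_get_none q hg]
              | some content =>
                have hc : pvFilesDict.contains q = true := by
                  rw [PySem.Dict.contains_eq_isSome_get?, hg]; rfl
                have hwcv := pvWc_get_some q content hg
                have hlc := pvLines_count q content hg
                simp [hc, PySem.Dict.getD_eq_get?_getD, hg, hwcv, hlc]
          · have h1 : p ≠ "ls" := hls
            simp [hls, hcat, hgrep, hwc]
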